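-- pv_equiv track=rewrite | github.com/lam-ntt/practice-at-ptit | python/PY01039_kiem_tra_so_dep.py | check
-- ===== SOURCE A (Python) =====
-- def check(n):
--     a={-1, }
--     for i in n:
--         a.add(i)
--     if len(a)!=3: return False
--
--     for i in range(0, len(n)-2):
--         if n[i]!=n[i+2]: return False
--     return True
-- ===== SOURCE B (Python) =====
-- def check(n):
--     even = {n[i] for i in range(0, len(n), 2)}
--     odd = {n[i] for i in range(1, len(n), 2)}
--     return len(even) == 1 and len(odd) == 1 and even != odd
-- ===== Notes on version B (the rewrite author's own statement) =====
-- stated objective: simpler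
-- what changed: Drops both of A's passes (the sentinel-set distinct-count loop and the pairwise n[i]==n[i+2] scan) and instead partitions the elements by index parity into two sets, answering from their cardinalities: each parity class must be a singleton and the two singletons must differ.
-- intended difference: On lists that contain -1 and are a perfect alternation of two distinct values (e.g. [-1,0,-1]), A returns False because it seeds its distinct-element set with -1 as a sentinel assumed absent from the input, while B returns True, the intended answer for a two-value alternating pattern. — e.g. on check([-1, 0, -1]): A returns false, B returns true
import Mathlib
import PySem

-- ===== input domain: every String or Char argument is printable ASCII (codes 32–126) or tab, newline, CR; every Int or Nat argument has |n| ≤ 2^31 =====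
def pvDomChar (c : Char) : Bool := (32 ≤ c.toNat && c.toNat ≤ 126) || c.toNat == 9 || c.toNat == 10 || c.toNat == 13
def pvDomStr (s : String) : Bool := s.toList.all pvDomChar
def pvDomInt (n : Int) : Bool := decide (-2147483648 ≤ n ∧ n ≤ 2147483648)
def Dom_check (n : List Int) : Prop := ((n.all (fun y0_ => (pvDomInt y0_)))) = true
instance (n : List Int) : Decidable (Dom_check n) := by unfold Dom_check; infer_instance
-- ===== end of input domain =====

-- B replaces A's two passes (sentinel-set distinct-count loop + pairwise n[i]==n[i+2] scan) by
-- partitioning the elements into two index-parity sets and answering from their cardinalities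
-- (objective: simpler); B fixes A's -1-sentinel quirk on alternating lists containing -1 (see D_check).


-- ===== PORT A =====
-- 'for i in range(0, len(n)-2): if n[i]!=n[i+2]: return False' (indices produced by the range
-- are always in bounds, so the total pyGetD is exact here)
def checkLoopA (n : List Int) : List Int → Bool
  | [] => true
  | i :: rest =>
    if PySem.List.pyGetD n i 0 ≠ PySem.List.pyGetD n (i + 2) 0 then false
    else checkLoopA n rest

def check (n : List Int) : Bool :=
  let a := n.foldl (fun s i => PySem.Set.add s i) (PySem.Set.ofList [(-1 : Int)])
  if PySem.Set.len a ≠ 3 then false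
  else checkLoopA n (PySem.List.pyRange 0 ((n.length : Int) - 2) 1)

-- ===== PORT B =====
-- '{n[i] for i in range(r, len(n), 2)}' (the comprehension Source B uses twice, once per parity;
-- the range keeps every index i in bounds, so the total pyGetD is exact here)
def strideClass (n : List Int) (r : Int) : PySem.Set Int :=
  PySem.Set.ofList ((PySem.List.pyRange r (n.length : Int) 2).map
    (fun i => PySem.List.pyGetD n i 0))

def check_alt (n : List Int) : Bool :=
  let even := strideClass n 0
  let odd := strideClass n 1
  PySem.Set.len even == 1 && (PySem.Set.len odd == 1 && !(PySem.Set.equal even odd))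

-- ===== PRECONDITION & SPEC =====
-- On lists that contain -1 and are a perfect alternation of two distinct values, A returns False
-- (its distinct-element set is seeded with the sentinel -1, assumed absent from the input),
-- while B returns True — the intended answer for a two-value alternating pattern.
def D_check (n : List Int) : Prop :=
  (-1 : Int) ∈ n ∧ 2 ≤ n.length ∧ n.getD 0 0 ≠ n.getD 1 0 ∧
  ∀ i < n.length - 2, n.getD i 0 = n.getD (i + 2) 0
instance (n : List Int) : Decidable (D_check n) := by unfold D_check; infer_instance

def Spec_check (n : List Int) (out : Bool) : Prop := ¬ D_check n → out = check_alt n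
instance (n : List Int) (out : Bool) : Decidable (Spec_check n out) := by unfold Spec_check; infer_instance

def pvDiffWitness_check : List Int := [-1, 0, -1]
def pvDiffWitnessOut_check : Bool × Bool := (false, true)

-- ===== CLAIM (what is proved, stated in full; the proofs are below) =====
def Claim_unchanged_check : Prop := ∀ (n : List Int), Dom_check n → Spec_check n (check n)
def Claim_changed_check : Prop := Dom_check (pvDiffWitness_check) ∧ D_check (pvDiffWitness_check) ∧ check (pvDiffWitness_check) = pvDiffWitnessOut_check.1 ∧ check_alt (pvDiffWitness_check) = pvDiffWitnessOut_check.2 ∧ pvDiffWitnessOut_check.1 ≠ pvDiffWitnessOut_check.2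
def Claim_exact_check : Prop := ∀ (n : List Int), Dom_check n → D_check n → check n ≠ check_alt n

-- ===== LEMMAS AND PROOFS =====

-- AltP: A's pairwise alternation condition; AltQ: same-value-as-index-parity condition
def AltP (n : List Int) : Prop := ∀ i < n.length - 2, n.getD i 0 = n.getD (i + 2) 0
def AltQ (n : List Int) : Prop := ∀ i < n.length, n.getD i 0 = n.getD (i % 2) 0

theorem altP_iff_altQ (n : List Int) : AltP n ↔ AltQ n := by
  constructor
  · intro hP i
    induction i using Nat.strong_induction_on with
    | _ i ih =>
      intro hi
      by_cases h2 : i < 2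
      · interval_cases i <;> simp
      · have h1 : n.getD (i - 2) 0 = n.getD i 0 := by
          have := hP (i - 2) (by omega)
          rwa [Nat.sub_add_cancel (by omega)] at this
        have h3 := ih (i - 2) (by omega) (by omega)
        have hm : (i - 2) % 2 = i % 2 := by omega
        rw [← h1, h3, hm]
  · intro hQ i hi
    have h1 := hQ i (by omega)
    have h2 := hQ (i + 2) (by omega)
    have hm : (i + 2) % 2 = i % 2 := by omega
    rw [h1, h2, hm]

theorem checkLoopA_iff (n : List Int) (l : List Int) :
    checkLoopA n l = true ↔ ∀ i ∈ l, PySem.List.pyGetD n i 0 = PySem.List.pyGetD n (i + 2) 0 := by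
  induction l with
  | nil => simp [checkLoopA]
  | cons i rest ih =>
    simp only [checkLoopA, List.mem_cons]
    split_ifs with h
    · simp only [false_iff]
      intro hc
      exact h (hc i (Or.inl rfl))
    · rw [not_not] at h
      rw [ih]
      constructor
      · rintro hr j (rfl | hj); · exact h
        · exact hr j hj
      · intro hall j hj; exact hall j (Or.inr hj)

theorem checkLoopA_true_iff (n : List Int) :
    checkLoopA n (PySem.List.pyRange 0 ((n.length : Int) - 2) 1) = true ↔ AltP n := by
  rw [checkLoopA_iff]
  constructor
  · intro h i hi
    have := h (i : Int) (by rw [PySem.List.mem_pyRange_one]; omega)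
    rw [PySem.List.pyGetD_natCast, show ((i : Int) + 2) = ((i + 2 : Nat) : Int) by push_cast; ring,
      PySem.List.pyGetD_natCast] at this
    exact this
  · intro h i hi
    rw [PySem.List.mem_pyRange_one] at hi
    obtain ⟨k, rfl⟩ : ∃ k : Nat, i = (k : Int) := ⟨i.toNat, by omega⟩
    rw [PySem.List.pyGetD_natCast, show ((k : Int) + 2) = ((k + 2 : Nat) : Int) by push_cast; ring,
      PySem.List.pyGetD_natCast]
    exact h k (by omega)

theorem ofList_length (n : List Int) : (PySem.Set.ofList n).length = n.toFinset.card := by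
  have hts : (PySem.Set.ofList n).toFinset = n.toFinset := by
    ext x; simp [PySem.Set.mem_ofList]
  rw [← hts, List.toFinset_card_of_nodup (PySem.Set.nodup_ofList n)]

theorem mem_strideClass (n : List Int) (r : Nat) (hr : r < 2) (x : Int) :
    x ∈ strideClass n (r : Int) ↔ ∃ k : Nat, k < n.length ∧ k % 2 = r ∧ x = n.getD k 0 := by
  unfold strideClass
  rw [PySem.Set.mem_ofList, List.mem_map]
  constructor
  · rintro ⟨i, hi, rfl⟩
    rw [PySem.List.mem_pyRange_iff_of_pos (by omega)] at hi
    obtain ⟨h1, h2, hd⟩ := hi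
    obtain ⟨k, rfl⟩ : ∃ k : Nat, i = (k : Int) := ⟨i.toNat, by omega⟩
    refine ⟨k, by omega, ?_, by rw [PySem.List.pyGetD_natCast]⟩
    obtain ⟨c, hc⟩ := hd
    omega
  · rintro ⟨k, hk, hkr, rfl⟩
    refine ⟨(k : Int), ?_, by rw [PySem.List.pyGetD_natCast]⟩
    rw [PySem.List.mem_pyRange_iff_of_pos (by omega)]
    refine ⟨by omega, by omega, ⟨((k - r) / 2 : Nat), by omega⟩⟩

theorem toFinset_card_eq_one_iff (l : List Int) :
    l.toFinset.card = 1 ↔ ∃ a, a ∈ l ∧ ∀ x ∈ l, x = a := by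
  rw [Finset.card_eq_one]
  constructor
  · rintro ⟨a, ha⟩
    refine ⟨a, ?_, ?_⟩
    · rw [← List.mem_toFinset, ha]; simp
    · intro x hx
      have : x ∈ l.toFinset := List.mem_toFinset.mpr hx
      rw [ha] at this; simpa using this
  · rintro ⟨a, hma, ha⟩
    refine ⟨a, ?_⟩
    ext x
    simp only [List.mem_toFinset, Finset.mem_singleton]
    exact ⟨fun hx => ha x hx, fun hx => hx ▸ hma⟩

-- PySem.Set.len (strideClass n r) = 1 ↔ the parity class r is a nonempty constant class
theorem strideClass_len_eq_one_iff (n : List Int) (r : Nat) (hr : r < 2) :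
    PySem.Set.len (strideClass n (r : Int)) = 1 ↔
      ∃ a, (∃ k : Nat, k < n.length ∧ k % 2 = r ∧ a = n.getD k 0) ∧
        ∀ x, (∃ k : Nat, k < n.length ∧ k % 2 = r ∧ x = n.getD k 0) → x = a := by
  unfold PySem.Set.len
  rw [show strideClass n (r : Int)
      = PySem.Set.ofList ((PySem.List.pyRange (r : Int) (n.length : Int) 2).map
        (fun i => PySem.List.pyGetD n i 0)) from rfl, ofList_length]
  rw [show ((((PySem.List.pyRange (r : Int) (n.length : Int) 2).map
      (fun i => PySem.List.pyGetD n i 0)).toFinset.card : Int) = 1 ↔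
      ((PySem.List.pyRange (r : Int) (n.length : Int) 2).map
      (fun i => PySem.List.pyGetD n i 0)).toFinset.card = 1) by exact_mod_cast Iff.rfl]
  rw [toFinset_card_eq_one_iff]
  constructor
  · rintro ⟨a, hma, ha⟩
    have hm := (mem_strideClass n r hr a).mp ((PySem.Set.mem_ofList _ _).mpr hma)
    refine ⟨a, hm, ?_⟩
    intro x hx
    exact ha x ((PySem.Set.mem_ofList _ _).mp ((mem_strideClass n r hr x).mpr hx))
  · rintro ⟨a, hma, ha⟩
    refine ⟨a, (PySem.Set.mem_ofList _ _).mp ((mem_strideClass n r hr a).mpr hma), ?_⟩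
    intro x hx
    exact ha x ((mem_strideClass n r hr x).mp ((PySem.Set.mem_ofList _ _).mpr hx))

theorem altQ_subset (n : List Int) (h : AltQ n) :
    n.toFinset ⊆ {n.getD 0 0, n.getD 1 0} := by
  intro x hx
  rw [List.mem_toFinset] at hx
  obtain ⟨i, hi, rfl⟩ := List.getElem_of_mem hx
  have := h i hi
  rw [List.getD_eq_getElem?_getD, List.getElem?_eq_getElem hi, Option.getD_some] at this
  rw [this]
  have : i % 2 = 0 ∨ i % 2 = 1 := by omega
  rcases this with h2 | h2 <;> rw [h2] <;> simp

theorem toFinset_eq_pair (n : List Int) (hlen : 2 ≤ n.length)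
    (h : AltQ n) : n.toFinset = {n.getD 0 0, n.getD 1 0} := by
  refine Finset.Subset.antisymm (altQ_subset n h) ?_
  intro x hx
  rw [List.mem_toFinset]
  rcases Finset.mem_insert.mp hx with rfl | hx
  · rw [List.getD_eq_getElem?_getD, List.getElem?_eq_getElem (by omega : 0 < n.length)]
    exact List.getElem_mem _
  · rw [Finset.mem_singleton] at hx; subst hx
    rw [List.getD_eq_getElem?_getD, List.getElem?_eq_getElem (by omega : 1 < n.length)]
    exact List.getElem_mem _

theorem pair_card_two (n : List Int) (hne : n.getD 0 0 ≠ n.getD 1 0) :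
    ({n.getD 0 0, n.getD 1 0} : Finset Int).card = 2 := by
  rw [Finset.card_insert_of_notMem (by simpa using hne), Finset.card_singleton]

theorem altQ_ne (n : List Int) (hc : n.toFinset.card = 2) (h : AltQ n) :
    n.getD 0 0 ≠ n.getD 1 0 := by
  intro he
  have hsub : n.toFinset ⊆ {n.getD 0 0} := by
    intro x hx
    have := altQ_subset n h hx
    simp only [← he, Finset.mem_insert, Finset.mem_singleton, or_self] at this ⊢
    exact this
  have := Finset.card_le_card hsub
  simp [hc] at this

theorem check_alt_eq_true_iff (n : List Int) :
    check_alt n = true ↔ n.toFinset.card = 2 ∧ AltQ n := by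
  unfold check_alt
  simp only [Bool.and_eq_true, beq_iff_eq, Bool.not_eq_true']
  constructor
  · rintro ⟨h0, h1, hne⟩
    obtain ⟨a, ⟨ka, hka, hpa, hae⟩, ha⟩ :=
      (strideClass_len_eq_one_iff n 0 (by omega)).mp (by exact h0)
    obtain ⟨b, ⟨kb, hkb, hpb, hbe⟩, hb⟩ :=
      (strideClass_len_eq_one_iff n 1 (by omega)).mp (by exact h1)
    have hlen : 2 ≤ n.length := by omega
    have ha0 : a = n.getD 0 0 := (ha (n.getD 0 0) ⟨0, by omega, by omega, rfl⟩).symm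
    have hb1 : b = n.getD 1 0 := (hb (n.getD 1 0) ⟨1, by omega, by omega, rfl⟩).symm
    have hQ : AltQ n := by
      intro i hi
      have hp : i % 2 = 0 ∨ i % 2 = 1 := by omega
      rcases hp with hp | hp
      · rw [ha (n.getD i 0) ⟨i, hi, hp, rfl⟩, ha0, hp]
      · rw [hb (n.getD i 0) ⟨i, hi, hp, rfl⟩, hb1, hp]
    have hab : n.getD 0 0 ≠ n.getD 1 0 := by
      intro he
      have : PySem.Set.equal (strideClass n 0) (strideClass n 1) = true := by
        rw [PySem.Set.equal_iff]
        intro x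
        have m0 : x ∈ strideClass n (0 : Int) ↔
            ∃ k : Nat, k < n.length ∧ k % 2 = 0 ∧ x = n.getD k 0 :=
          mem_strideClass n 0 (by omega) x
        have m1 : x ∈ strideClass n (1 : Int) ↔
            ∃ k : Nat, k < n.length ∧ k % 2 = 1 ∧ x = n.getD k 0 :=
          mem_strideClass n 1 (by omega) x
        rw [m0, m1]
        constructor
        · rintro hx
          have := ha x hx
          exact ⟨1, by omega, by omega, by rw [this, ha0, he]⟩
        · rintro hx
          have := hb x hx
          exact ⟨0, by omega, by omega, by rw [this, hb1, ← he]⟩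
      rw [this] at hne; cases hne
    exact ⟨by rw [toFinset_eq_pair n hlen hQ, pair_card_two n hab], hQ⟩
  · rintro ⟨hc, hQ⟩
    have hlen : 2 ≤ n.length := le_trans (by omega : 2 ≤ n.toFinset.card) n.toFinset_card_le
    have hab := altQ_ne n hc hQ
    have ha : ∀ x, (∃ k : Nat, k < n.length ∧ k % 2 = 0 ∧ x = n.getD k 0) → x = n.getD 0 0 := by
      rintro x ⟨k, hk, hp, rfl⟩
      rw [hQ k hk, hp]
    have hb : ∀ x, (∃ k : Nat, k < n.length ∧ k % 2 = 1 ∧ x = n.getD k 0) → x = n.getD 1 0 := by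
      rintro x ⟨k, hk, hp, rfl⟩
      rw [hQ k hk, hp]
    refine ⟨?_, ?_, ?_⟩
    · exact (strideClass_len_eq_one_iff n 0 (by omega)).mpr
        ⟨n.getD 0 0, ⟨0, by omega, by omega, rfl⟩, ha⟩
    · exact (strideClass_len_eq_one_iff n 1 (by omega)).mpr
        ⟨n.getD 1 0, ⟨1, by omega, by omega, rfl⟩, hb⟩
    · rw [Bool.eq_false_iff]
      intro he
      rw [PySem.Set.equal_iff] at he
      have h01 : n.getD 0 0 ∈ strideClass n (1 : Int) := by
        rw [← he]
        exact (mem_strideClass n 0 (by omega) _).mpr ⟨0, by omega, by omega, rfl⟩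
      have := hb _ ((mem_strideClass n 1 (by omega) _).mp h01)
      exact hab this

theorem a_length (n : List Int) :
    (PySem.Set.update (PySem.Set.ofList [(-1 : Int)]) n).length
      = (insert (-1 : Int) n.toFinset).card := by
  have hts : (PySem.Set.update (PySem.Set.ofList [(-1 : Int)]) n).toFinset
      = insert (-1 : Int) n.toFinset := by
    ext x; simp [PySem.Set.mem_update, PySem.Set.mem_ofList]
  rw [← hts, List.toFinset_card_of_nodup
    (PySem.Set.nodup_update _ _ (PySem.Set.nodup_ofList _))]

theorem check_eq_true_iff (n : List Int) :
    check n = true ↔ (insert (-1 : Int) n.toFinset).card = 3 ∧ AltP n := by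
  rw [show check n = (if PySem.Set.len (PySem.Set.update (PySem.Set.ofList [(-1 : Int)]) n) ≠ 3
      then false else checkLoopA n (PySem.List.pyRange 0 ((n.length : Int) - 2) 1)) from rfl]
  split_ifs with h
  · simp only [false_iff]
    rintro ⟨hc, -⟩
    exact h (by simp [PySem.Set.len, a_length, hc])
  · have hc : (insert (-1 : Int) n.toFinset).card = 3 := by
      simp only [PySem.Set.len, a_length, ne_eq, not_not] at h
      exact_mod_cast h
    rw [checkLoopA_true_iff]
    simp [hc]

-- ===== VERDICT (by name: the statement is the Claim_ definition above) =====
theorem check_spec : Claim_unchanged_check := by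
  intro n _ hD
  rw [Bool.eq_iff_iff, check_eq_true_iff, check_alt_eq_true_iff]
  by_cases hm : (-1 : Int) ∈ n
  · have hins : insert (-1 : Int) n.toFinset = n.toFinset :=
      Finset.insert_eq_self.mpr (List.mem_toFinset.mpr hm)
    rw [hins]
    constructor
    · rintro ⟨hc, hP⟩
      have hQ := (altP_iff_altQ n).mp hP
      have := Finset.card_le_card (altQ_subset n hQ)
      have h2 : ({n.getD 0 0, n.getD 1 0} : Finset Int).card ≤ 2 :=
        Finset.card_insert_le _ _ |>.trans (by simp)
      omega
    · rintro ⟨hc, hQ⟩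
      exfalso
      apply hD
      unfold D_check
      have hlen : 2 ≤ n.length := le_trans (by omega : 2 ≤ n.toFinset.card) n.toFinset_card_le
      exact ⟨hm, hlen, altQ_ne n hc hQ, (altP_iff_altQ n).mpr hQ⟩
  · have hins : (insert (-1 : Int) n.toFinset).card = n.toFinset.card + 1 :=
      Finset.card_insert_of_notMem (fun hx => hm (List.mem_toFinset.mp hx))
    rw [hins, altP_iff_altQ]
    constructor
    · rintro ⟨hc, hQ⟩; exact ⟨by omega, hQ⟩
    · rintro ⟨hc, hQ⟩; exact ⟨by omega, hQ⟩

theorem check_changed : Claim_changed_check := by unfold Claim_changed_check; decide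

theorem check_tight : Claim_exact_check := by
  intro n _ hD
  unfold D_check at hD
  obtain ⟨hm, hlen, hne, hP⟩ := hD
  have hQ : AltQ n := (altP_iff_altQ n).mp hP
  have hca : check_alt n = true :=
    (check_alt_eq_true_iff n).mpr ⟨by rw [toFinset_eq_pair n hlen hQ, pair_card_two n hne], hQ⟩
  have hcf : check n = false := by
    rw [Bool.eq_false_iff]
    intro hct
    obtain ⟨hc, -⟩ := (check_eq_true_iff n).mp hct
    rw [Finset.insert_eq_self.mpr (List.mem_toFinset.mpr hm),
      toFinset_eq_pair n hlen hQ, pair_card_two n hne] at hc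
    omega
  rw [hca, hcf]
  simp
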